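-- pv_equiv track=rewrite | github.com/kiratut/v4 | scripts/convert_md_to_excel.py | _find_unescaped_colon
-- ===== SOURCE A (Python) =====
-- def _find_unescaped_colon(line):
--     bs = 0
--     for i, ch in enumerate(line):
--         if ch == "\\":
--             bs += 1
--             continue
--         if ch == ":" and (bs % 2 == 0):
--             return i
--         bs = 0
--     return -1
-- ===== SOURCE B (Python) =====
-- def _find_unescaped_colon(line):
--     start = 0
--     while True:
--         idx = line.find(":", start)
--         if idx == -1:
--             return -1
--         j = idx - 1
--         bs = 0
--         while j >= 0 and line[j] == "\\":
--             bs += 1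
--             j -= 1
--         if bs % 2 == 0:
--             return idx
--         start = idx + 1
-- ===== Notes on version B (the rewrite author's own statement) =====
-- stated objective: alternative
-- what changed: Replaces the single forward character scan with a running backslash counter by repeated str.find(':', start) jumps plus a backward count of the consecutive backslash run before each found colon.
import Mathlib
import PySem

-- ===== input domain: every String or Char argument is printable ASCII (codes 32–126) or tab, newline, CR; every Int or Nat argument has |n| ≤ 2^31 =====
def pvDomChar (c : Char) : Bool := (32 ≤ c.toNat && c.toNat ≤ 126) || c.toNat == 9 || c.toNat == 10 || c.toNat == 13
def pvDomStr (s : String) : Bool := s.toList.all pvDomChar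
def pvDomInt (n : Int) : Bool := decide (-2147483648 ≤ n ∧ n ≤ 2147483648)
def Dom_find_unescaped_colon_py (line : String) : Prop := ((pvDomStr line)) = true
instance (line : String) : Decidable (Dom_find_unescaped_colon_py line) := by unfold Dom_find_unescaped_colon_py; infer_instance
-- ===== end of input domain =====

-- B replaces A's forward scan with repeated find(':', start) jumps and a backward
-- count of the consecutive backslash run before each found colon (objective: alternative).

-- ===== PORT A =====
-- A's loop: enumerate with running count bs of the current consecutive-backslash run.
def pvAuxA : List Char → Nat → Nat → Int
  | [], _, _ => -1
  | ch :: rest, i, bs =>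
    if ch = '\\' then pvAuxA rest (i + 1) (bs + 1)
    else if ch = ':' ∧ bs % 2 = 0 then (i : Int)
    else pvAuxA rest (i + 1) 0

def find_unescaped_colon_py (line : String) : Int := pvAuxA line.toList 0 0

-- ===== PORT B =====
-- line.find(':', i): index of the first ':' at position ≥ i, or none.
def pvFindFrom (cs : List Char) (i : Nat) : Option Nat :=
  if h : i < cs.length then
    if cs[i] = ':' then some i else pvFindFrom cs (i + 1)
  else none
termination_by cs.length - i

-- pvBsRun cs idx: length of the run of consecutive '\' immediately before index idx
-- (B's inner backward while loop, counted from the top index downward).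
def pvBsRun (cs : List Char) : Nat → Nat
  | 0 => 0
  | j + 1 => if cs.getD j ' ' = '\\' then pvBsRun cs j + 1 else 0

-- B's outer `while True` loop; fuel only makes the recursion structurally total.
def pvAuxB (cs : List Char) (start : Nat) : Nat → Int
  | 0 => -1
  | fuel + 1 =>
    match pvFindFrom cs start with
    | none => -1
    | some idx => if pvBsRun cs idx % 2 = 0 then (idx : Int) else pvAuxB cs (idx + 1) fuel

def find_unescaped_colon_py_alt (line : String) : Int :=
  pvAuxB line.toList 0 (line.toList.length + 1)

-- ===== PRECONDITION & SPEC =====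
def Spec_find_unescaped_colon_py (line : String) (out : Int) : Prop := out = find_unescaped_colon_py_alt line
instance (line : String) (out : Int) : Decidable (Spec_find_unescaped_colon_py line out) := by unfold Spec_find_unescaped_colon_py; infer_instance

-- ===== CLAIM (what is proved, stated in full; the proofs are below) =====
def Claim_equal_find_unescaped_colon_py : Prop := ∀ (line : String), Dom_find_unescaped_colon_py line → Spec_find_unescaped_colon_py line (find_unescaped_colon_py line)

-- ===== LEMMAS AND PROOFS =====

-- Common characterization: first index ≥ i holding ':' preceded by an even backslash run.
def pvSpec (cs : List Char) (i : Nat) : Int :=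
  if h : i < cs.length then
    if cs[i] = ':' ∧ pvBsRun cs i % 2 = 0 then (i : Int) else pvSpec cs (i + 1)
  else -1
termination_by cs.length - i

lemma pvBsRun_succ (cs : List Char) (i : Nat) (h : i < cs.length) :
    pvBsRun cs (i + 1) = if cs[i] = '\\' then pvBsRun cs i + 1 else 0 := by
  simp [pvBsRun, List.getD_eq_getElem?_getD, h]

lemma lemA : ∀ n cs i, cs.length - i ≤ n →
    pvAuxA (cs.drop i) i (pvBsRun cs i) = pvSpec cs i := by
  intro n
  induction n with
  | zero =>
    intro cs i h
    have hle : cs.length ≤ i := by omega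
    rw [List.drop_eq_nil_of_le hle]
    simp [pvAuxA, pvSpec, Nat.not_lt.mpr hle]
  | succ n ih =>
    intro cs i h
    by_cases hi : i < cs.length
    · rw [List.drop_eq_getElem_cons hi]
      rw [pvSpec]
      simp only [hi, dite_true]
      by_cases hbs : cs[i] = '\\'
      · have hc : ¬ (cs[i] = ':' ∧ pvBsRun cs i % 2 = 0) := by
          intro hcon; rw [hcon.1] at hbs; exact absurd hbs (by decide)
        rw [pvAuxA]
        have := ih cs (i + 1) (by omega)
        rw [pvBsRun_succ cs i hi] at this
        simp only [hbs, if_true] at this ⊢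
        rw [this]
        simp
      · by_cases hc : cs[i] = ':' ∧ pvBsRun cs i % 2 = 0
        · rw [pvAuxA]; simp [hc]
        · rw [pvAuxA]
          simp only [hbs, if_false, hc, if_false]
          have := ih cs (i + 1) (by omega)
          rwa [pvBsRun_succ cs i hi, if_neg hbs] at this
    · rw [List.drop_eq_nil_of_le (by omega)]
      simp [pvAuxA, pvSpec, hi]

lemma pvFindFrom_none : ∀ n cs i, cs.length - i ≤ n →
    pvFindFrom cs i = none → pvSpec cs i = -1 := by
  intro n
  induction n with
  | zero =>
    intro cs i h _
    rw [pvSpec]; simp [show ¬ i < cs.length by omega]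
  | succ n ih =>
    intro cs i h hf
    by_cases hi : i < cs.length
    · rw [pvFindFrom] at hf
      simp only [hi, dite_true] at hf
      by_cases hc : cs[i] = ':'
      · simp [hc] at hf
      · simp only [hc, if_false] at hf
        rw [pvSpec]
        simp only [hi, dite_true, hc, false_and, if_false]
        exact ih cs (i + 1) (by omega) hf
    · rw [pvSpec]; simp [hi]

lemma pvFindFrom_some : ∀ n cs i idx, cs.length - i ≤ n →
    pvFindFrom cs i = some idx →
    i ≤ idx ∧ idx < cs.length ∧ (∃ h : idx < cs.length, cs[idx] = ':') ∧ pvSpec cs i = pvSpec cs idx := by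
  intro n
  induction n with
  | zero =>
    intro cs i idx h hf
    rw [pvFindFrom] at hf
    simp [show ¬ i < cs.length by omega] at hf
  | succ n ih =>
    intro cs i idx h hf
    by_cases hi : i < cs.length
    · rw [pvFindFrom] at hf
      simp only [hi, dite_true] at hf
      by_cases hc : cs[i] = ':'
      · simp only [hc, if_true, Option.some.injEq] at hf
        subst hf
        exact ⟨le_refl _, hi, ⟨hi, hc⟩, rfl⟩
      · simp only [hc, if_false] at hf
        obtain ⟨h1, h2, h3, h4⟩ := ih cs (i + 1) idx (by omega) hf
        refine ⟨by omega, h2, h3, ?_⟩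
        rw [pvSpec]
        simp only [hi, dite_true, hc, false_and, if_false]
        exact h4
    · rw [pvFindFrom] at hf; simp [hi] at hf

lemma lemB : ∀ fuel cs i, cs.length + 1 - i ≤ fuel →
    pvAuxB cs i fuel = pvSpec cs i := by
  intro fuel
  induction fuel with
  | zero =>
    intro cs i h
    rw [pvSpec]
    simp [pvAuxB, show ¬ i < cs.length by omega]
  | succ n ih =>
    intro cs i h
    rw [pvAuxB]
    cases hf : pvFindFrom cs i with
    | none => rw [pvFindFrom_none cs.length cs i (by omega) hf]
    | some idx =>
      obtain ⟨h1, h2, ⟨hlt, hc⟩, h4⟩ := pvFindFrom_some cs.length cs i idx (by omega) hf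
      rw [h4, pvSpec]
      simp only [hlt, dite_true, hc, true_and]
      by_cases hp : pvBsRun cs idx % 2 = 0
      · simp [hp]
      · simp only [hp, if_false]
        exact ih cs (idx + 1) (by omega)

-- ===== VERDICT (by name: the statement is the Claim_ definition above) =====
theorem find_unescaped_colon_py_spec : Claim_equal_find_unescaped_colon_py := by
  intro line _
  unfold Spec_find_unescaped_colon_py find_unescaped_colon_py find_unescaped_colon_py_alt
  have hA := lemA line.toList.length line.toList 0 (by omega)
  have hB := lemB (line.toList.length + 1) line.toList 0 (by omega)
  simp only [List.drop_zero, pvBsRun] at hA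
  rw [hA, hB]
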